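-- pv_equiv track=rewrite | github.com/BChaloux-Cyn/MDF-Simulator | tools/drawio.py | _grid_layout
-- ===== SOURCE A (Python) =====
-- CLASS_W = 220    # fixed class width
--
-- MARGIN = 120     # canvas margin
--
-- def _grid_layout(
--     n_vertices: int,
--     col_gap: int = CLASS_W + 40,
--     row_gap: int = 200,
--     margin: int = MARGIN,
-- ) -> list[tuple[float, float]]:
--     """Place vertices in a left-to-right grid, wrapping at ceil(sqrt(n)) columns."""
--     import math
--     if n_vertices == 0:
--         return []
--     cols = max(1, math.ceil(math.sqrt(n_vertices)))
--     return [
--         (margin + (i % cols) * col_gap, margin + (i // cols) * row_gap)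
--         for i in range(n_vertices)
--     ]
-- ===== SOURCE B (Python) =====
-- CLASS_W = 220
--
-- MARGIN = 120
--
-- def _grid_layout(
--     n_vertices: int,
--     col_gap: int = CLASS_W + 40,
--     row_gap: int = 200,
--     margin: int = MARGIN,
-- ) -> list[tuple[float, float]]:
--     """Walk the grid point by point: advance x by col_gap, wrap to a new row
--     after cols points. No index arithmetic (no % or //) anywhere."""
--     import math
--     if n_vertices == 0:
--         return []
--     cols = max(1, math.ceil(math.sqrt(n_vertices)))
--     out = []
--     x = y = margin
--     c = 0
--     for _ in range(n_vertices):
--         out.append((x, y))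
--         c += 1
--         if c == cols:
--             c = 0
--             x = margin
--             y += row_gap
--         else:
--             x += col_gap
--     return out
-- ===== Notes on version B (the rewrite author's own statement) =====
-- stated objective: alternative
-- what changed: B replaces A's flat comprehension that computes each point from its index by divmod (i % cols, i // cols) with a stateful walk: it keeps current coordinates (x, y) and a column counter, emits the current point, and advances by pure addition, wrapping x back to the margin and stepping y when the counter reaches cols.
-- outside the precondition, e.g. on _grid_layout(-3, 260, 200, 120): A raises ValueError, B raises ValueError
import Mathlib
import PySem

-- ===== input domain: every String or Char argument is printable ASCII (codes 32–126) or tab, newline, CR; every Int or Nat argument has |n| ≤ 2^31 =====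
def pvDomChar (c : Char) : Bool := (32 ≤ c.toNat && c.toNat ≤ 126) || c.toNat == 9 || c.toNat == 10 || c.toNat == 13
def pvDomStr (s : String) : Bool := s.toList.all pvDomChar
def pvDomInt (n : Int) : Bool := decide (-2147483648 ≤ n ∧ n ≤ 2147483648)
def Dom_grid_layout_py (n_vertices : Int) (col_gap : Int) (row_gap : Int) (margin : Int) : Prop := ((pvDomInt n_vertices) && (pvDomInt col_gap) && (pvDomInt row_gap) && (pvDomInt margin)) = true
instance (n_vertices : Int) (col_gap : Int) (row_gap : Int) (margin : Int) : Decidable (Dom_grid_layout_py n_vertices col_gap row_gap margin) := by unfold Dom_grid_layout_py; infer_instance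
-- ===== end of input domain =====

-- B replaces A's per-index divmod comprehension by a stateful coordinate walk
-- (pure addition with a row wrap); objective: alternative decomposition.

-- Hand port of `math.ceil(math.sqrt(n))`: exact for 0 ≤ n ≤ 2^31 (the admitted domain),
-- where the double sqrt is accurate enough that its ceiling equals the integer ceiling sqrt.
def pyCeilSqrt (n : Int) : Int :=
  let s := Nat.sqrt n.toNat
  if s * s = n.toNat then (s : Int) else (s : Int) + 1

-- ===== PORT A =====
def grid_layout_py (n_vertices : Int) (col_gap : Int) (row_gap : Int) (margin : Int) : List (Int × Int) :=
  if n_vertices = 0 then []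
  else
    let cols := max 1 (pyCeilSqrt n_vertices)
    (PySem.List.pyRange 0 n_vertices 1).map (fun i =>
      (margin + PySem.Int.mod i cols * col_gap, margin + PySem.Int.floordiv i cols * row_gap))

-- ===== PORT B =====
-- The `for _ in range(n)` loop of Source B with state (x, y, c), transliterated as fuel recursion.
def gridWalk (fuel : Nat) (cols col_gap row_gap margin : Int) (x y c : Int) : List (Int × Int) :=
  match fuel with
  | 0 => []
  | fuel + 1 =>
      (x, y) ::
        (if c + 1 = cols then gridWalk fuel cols col_gap row_gap margin margin (y + row_gap) 0
         else gridWalk fuel cols col_gap row_gap margin (x + col_gap) y (c + 1))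

def grid_layout_py_alt (n_vertices : Int) (col_gap : Int) (row_gap : Int) (margin : Int) : List (Int × Int) :=
  if n_vertices = 0 then []
  else
    let cols := max 1 (pyCeilSqrt n_vertices)
    gridWalk n_vertices.toNat cols col_gap row_gap margin margin margin 0

-- ===== PRECONDITION & SPEC =====
-- Pre_ excludes negative n_vertices, on which A raises ValueError (math.sqrt of a negative number).
def Pre_grid_layout_py (n_vertices : Int) (col_gap : Int) (row_gap : Int) (margin : Int) : Prop :=
  0 ≤ n_vertices
instance (n_vertices : Int) (col_gap : Int) (row_gap : Int) (margin : Int) : Decidable (Pre_grid_layout_py n_vertices col_gap row_gap margin) := by unfold Pre_grid_layout_py; infer_instance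

def pvWitness_grid_layout_py : Int × Int × Int × Int := (5, 260, 200, 120)

def Spec_grid_layout_py (n_vertices : Int) (col_gap : Int) (row_gap : Int) (margin : Int) (out : List (Int × Int)) : Prop := out = grid_layout_py_alt n_vertices col_gap row_gap margin
instance (n_vertices : Int) (col_gap : Int) (row_gap : Int) (margin : Int) (out : List (Int × Int)) : Decidable (Spec_grid_layout_py n_vertices col_gap row_gap margin out) := by unfold Spec_grid_layout_py; infer_instance

-- ===== CLAIM (what is proved, stated in full; the proofs are below) =====
def Claim_equal_grid_layout_py : Prop := ∀ (n_vertices : Int) (col_gap : Int) (row_gap : Int) (margin : Int), Dom_grid_layout_py n_vertices col_gap row_gap margin → Pre_grid_layout_py n_vertices col_gap row_gap margin → Spec_grid_layout_py n_vertices col_gap row_gap margin (grid_layout_py n_vertices col_gap row_gap margin)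

-- ===== LEMMAS AND PROOFS =====

-- Loop invariant: started at the state of flat index i, the walk emits the
-- divmod-indexed points for indices i, i+1, …, i+fuel-1.
lemma walk_spec (C : Nat) (hC : 0 < C) (cg rg m : Int) :
    ∀ (fuel i : Nat),
      gridWalk fuel (C : Int) cg rg m
        (m + ((i % C : Nat) : Int) * cg) (m + ((i / C : Nat) : Int) * rg) ((i % C : Nat) : Int)
      = (List.range' i fuel).map
          (fun j => (m + ((j % C : Nat) : Int) * cg, m + ((j / C : Nat) : Int) * rg)) := by
  intro fuel
  induction fuel with
  | zero => intro i; rfl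
  | succ fuel ih =>
      intro i
      rw [List.range'_succ, List.map_cons]
      unfold gridWalk
      congr 1
      obtain hqr := Nat.div_add_mod i C
      by_cases h : i % C + 1 = C
      · have hcond : ((i % C : Nat) : Int) + 1 = (C : Int) := by exact_mod_cast h
        rw [if_pos hcond]
        have hsucc : i + 1 = C * (i / C + 1) := by rw [Nat.mul_succ]; omega
        have hmod : (i + 1) % C = 0 := by
          conv_lhs => rw [hsucc]
          exact Nat.mul_mod_right _ _
        have hdiv : (i + 1) / C = i / C + 1 := by
          conv_lhs => rw [hsucc]
          exact Nat.mul_div_cancel_left _ hC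
        have := ih (i + 1)
        rw [hmod, hdiv] at this
        simpa [add_mul, one_mul, add_assoc] using this
      · have hlt : i % C < C := Nat.mod_lt _ hC
        have hcond : ¬ (((i % C : Nat) : Int) + 1 = (C : Int)) := by
          intro hc; exact h (by exact_mod_cast hc)
        rw [if_neg hcond]
        have hsucc : i + 1 = C * (i / C) + (i % C + 1) := by omega
        have hz : (i % C + 1) / C = 0 := Nat.div_eq_of_lt (by omega)
        have hmod : (i + 1) % C = i % C + 1 := by
          conv_lhs => rw [hsucc]
          rw [Nat.mul_add_mod]
          exact Nat.mod_eq_of_lt (by omega)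
        have hdiv : (i + 1) / C = i / C := by
          conv_lhs => rw [hsucc]
          rw [Nat.mul_add_div hC, hz, Nat.add_zero]
        have := ih (i + 1)
        rw [hmod, hdiv] at this
        simpa [add_mul, one_mul, add_assoc] using this

-- ===== VERDICT (by name: the statement is the Claim_ definition above) =====
theorem grid_layout_py_spec : Claim_equal_grid_layout_py := by
  intro n cg rg m _ hn
  unfold Spec_grid_layout_py grid_layout_py grid_layout_py_alt
  by_cases h0 : n = 0
  · simp [h0]
  · simp only [if_neg h0]
    set cols := max 1 (pyCeilSqrt n) with hcols
    have hcpos : 0 < cols := lt_of_lt_of_le Int.zero_lt_one (le_max_left 1 _)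
    obtain ⟨C, hC⟩ : ∃ C : Nat, cols = (C : Int) := ⟨cols.toNat, (Int.toNat_of_nonneg hcpos.le).symm⟩
    obtain ⟨N, hN⟩ : ∃ Nn : Nat, n = (Nn : Int) := ⟨n.toNat, (Int.toNat_of_nonneg hn).symm⟩
    have hCpos : 0 < C := by exact_mod_cast hC ▸ hcpos
    have hw := walk_spec C hCpos cg rg m N 0
    simp only [Nat.zero_mod, Nat.zero_div, Nat.cast_zero, zero_mul, add_zero] at hw
    rw [hN, hC, Int.toNat_natCast, hw, PySem.List.pyRange_zero_natCast, List.map_map,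
      List.range_eq_range']
    apply List.map_congr_left
    intro k _
    simp [PySem.Int.mod_natCast, PySem.Int.floordiv_natCast]
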